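-- pv_equiv track=rewrite | github.com/kmad1729/basic_ds | coursera_algo2/week3/compute_edit_distance.py | _get_similarity_table
-- ===== SOURCE A (Python) =====
-- def _get_similarity_table(s1, s2, alpha_gap=1):
--     m = len(s1)
--     n = len(s2)
--
--     similarity_table = [ [None] * (n + 1) for i in range(m + 1)]
--     for i in range(m+1):
--         similarity_table[i][0] = i * alpha_gap
--     for i in range(n + 1):
--         similarity_table[0][i] = i * alpha_gap
--
--     for i in range(1, m+1):
--         for j in range(1, n+1):
--             x = s1[i-1]
--             y = s2[j-1]
--             diff_x_y = 1 if x != y else 0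
--             similarity_table[i][j] = min(
--                     diff_x_y + similarity_table[i-1][j-1],
--                     alpha_gap + similarity_table[i-1][j],
--                     alpha_gap + similarity_table[i][j-1])
--     return similarity_table
-- ===== SOURCE B (Python) =====
-- def _get_similarity_table(s1, s2, alpha_gap=1):
--     # Top-down memoized recursion over the subproblem (i, j) instead of A's
--     # bottom-up nested index loops over a preallocated table.
--     memo = {}
--
--     def d(i, j):
--         if (i, j) in memo:
--             return memo[(i, j)]
--         if i == 0:
--             v = j * alpha_gap
--         elif j == 0:
--             v = i * alpha_gap
--         else:
--             v = min((0 if s1[i - 1] == s2[j - 1] else 1) + d(i - 1, j - 1),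
--                     alpha_gap + d(i - 1, j),
--                     alpha_gap + d(i, j - 1))
--         memo[(i, j)] = v
--         return v
--
--     return [[d(i, j) for j in range(len(s2) + 1)]
--             for i in range(len(s1) + 1)]
-- ===== Notes on version B (the rewrite author's own statement) =====
-- stated objective: alternative
-- what changed: A fills a preallocated (m+1)x(n+1) table bottom-up with nested index loops and in-place 2D writes; B computes each cell by a top-down recursive helper d(i,j) memoized in a dict, with the table produced as a comprehension of d-values.
import Mathlib
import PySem

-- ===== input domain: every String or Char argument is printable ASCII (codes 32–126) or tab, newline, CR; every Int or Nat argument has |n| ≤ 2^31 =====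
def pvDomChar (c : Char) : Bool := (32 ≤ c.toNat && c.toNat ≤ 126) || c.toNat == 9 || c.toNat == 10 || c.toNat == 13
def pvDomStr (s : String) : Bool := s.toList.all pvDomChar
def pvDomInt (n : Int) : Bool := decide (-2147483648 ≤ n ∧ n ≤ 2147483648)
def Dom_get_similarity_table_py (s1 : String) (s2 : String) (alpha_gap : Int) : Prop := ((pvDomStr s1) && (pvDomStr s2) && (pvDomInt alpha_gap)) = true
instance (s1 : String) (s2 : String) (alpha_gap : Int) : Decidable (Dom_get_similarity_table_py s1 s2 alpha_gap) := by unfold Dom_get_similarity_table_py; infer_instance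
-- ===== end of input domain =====

-- B replaces A's bottom-up nested index loops over a preallocated table by a
-- top-down recursive helper d(i,j) memoized in a dict, the table being the
-- comprehension of d-values; objective: alternative decomposition, same values.

-- ===== PORT A =====
-- Python '[None] * (n+1)' row: None is ported as 0 — every cell is overwritten
-- before it is read or returned, so the placeholder value is never observable.
def get_similarity_table_py (s1 : String) (s2 : String) (alpha_gap : Int) : List (List Int) :=
  let cs1 := s1.toList
  let cs2 := s2.toList
  let m : Int := cs1.length
  let n : Int := cs2.length
  let t0 : List (List Int) := (PySem.List.pyRange 0 (m+1) 1).map (fun _ => List.replicate (n+1).toNat (0:Int))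
  let t1 := (PySem.List.pyRange 0 (m+1) 1).foldl
    (fun t i => PySem.List.pySetD t i (PySem.List.pySetD (PySem.List.pyGetD t i []) 0 (i * alpha_gap))) t0
  let t2 := (PySem.List.pyRange 0 (n+1) 1).foldl
    (fun t i => PySem.List.pySetD t 0 (PySem.List.pySetD (PySem.List.pyGetD t 0 []) i (i * alpha_gap))) t1
  (PySem.List.pyRange 1 (m+1) 1).foldl (fun t i =>
    (PySem.List.pyRange 1 (n+1) 1).foldl (fun t j =>
      let x := PySem.List.pyGetD cs1 (i-1) ' '
      let y := PySem.List.pyGetD cs2 (j-1) ' '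
      let diff_x_y : Int := if x ≠ y then 1 else 0
      PySem.List.pySetD t i (PySem.List.pySetD (PySem.List.pyGetD t i [])
        j (min (diff_x_y + PySem.List.pyGetD (PySem.List.pyGetD t (i-1) []) (j-1) 0)
           (min (alpha_gap + PySem.List.pyGetD (PySem.List.pyGetD t (i-1) []) j 0)
                (alpha_gap + PySem.List.pyGetD (PySem.List.pyGetD t i []) (j-1) 0))))) t) t2

-- ===== PORT B =====
-- The memoized helper d(i, j).  Python's memo keys are the pairs (i, j) of the
-- range indices, which are nonnegative, so the memo is keyed by Nat × Nat.
-- Branch order is Source B's: memo hit first, then i == 0, then j == 0, then the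
-- three recursive calls in Python's evaluation order; every computed value is
-- stored in the memo before being returned, exactly as Source B does.
def pvMemoD (cs1 cs2 : List Char) (g : Int) :
    Nat → Nat → PySem.Dict (Nat × Nat) Int → Int × PySem.Dict (Nat × Nat) Int
  | i, j, memo =>
    match memo.get? (i, j) with
    | some v => (v, memo)
    | none =>
      match i, j with
      | 0, j => ((j : Int) * g, memo.insert (0, j) ((j : Int) * g))
      | i+1, 0 => (((i : Int) + 1) * g, memo.insert (i+1, 0) (((i : Int) + 1) * g))
      | i+1, j+1 =>
        let r1 := pvMemoD cs1 cs2 g i j memo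
        let r2 := pvMemoD cs1 cs2 g i (j+1) r1.2
        let r3 := pvMemoD cs1 cs2 g (i+1) j r2.2
        let v := min ((if cs1.getD i ' ' = cs2.getD j ' ' then (0:Int) else 1) + r1.1)
                   (min (g + r2.1) (g + r3.1))
        (v, r3.2.insert (i+1, j+1) v)
  termination_by i j _ => (i, j)

def get_similarity_table_py_alt (s1 : String) (s2 : String) (alpha_gap : Int) : List (List Int) :=
  let cs1 := s1.toList
  let cs2 := s2.toList
  ((List.range (cs1.length + 1)).foldl (fun acc i =>
      let r := (List.range (cs2.length + 1)).foldl (fun acc2 j =>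
          let p := pvMemoD cs1 cs2 alpha_gap i j acc2.2
          (acc2.1 ++ [p.1], p.2)) (([] : List Int), acc.2)
      (acc.1 ++ [r.1], r.2)) (([] : List (List Int)), (PySem.Dict.empty : PySem.Dict (Nat × Nat) Int))).1

-- ===== PRECONDITION & SPEC =====
def Spec_get_similarity_table_py (s1 : String) (s2 : String) (alpha_gap : Int) (out : List (List Int)) : Prop := out = get_similarity_table_py_alt s1 s2 alpha_gap
instance (s1 : String) (s2 : String) (alpha_gap : Int) (out : List (List Int)) : Decidable (Spec_get_similarity_table_py s1 s2 alpha_gap out) := by unfold Spec_get_similarity_table_py; infer_instance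

-- ===== CLAIM (what is proved, stated in full; the proofs are below) =====
def Claim_equal_get_similarity_table_py : Prop := ∀ (s1 : String) (s2 : String) (alpha_gap : Int), Dom_get_similarity_table_py s1 s2 alpha_gap → Spec_get_similarity_table_py s1 s2 alpha_gap (get_similarity_table_py s1 s2 alpha_gap)

-- ===== LEMMAS AND PROOFS =====

-- The common specification both proofs aim at: the textbook edit-distance
-- recurrence, written as a plain recursive function on (i, j).
def pvEd (cs1 cs2 : List Char) (g : Int) : Nat → Nat → Int
  | 0, j => (j : Int) * g
  | i+1, 0 => ((i : Int) + 1) * g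
  | i+1, j+1 =>
      min ((if cs1.getD i ' ' = cs2.getD j ' ' then (0:Int) else 1) + pvEd cs1 cs2 g i j)
        (min (g + pvEd cs1 cs2 g i (j+1)) (g + pvEd cs1 cs2 g (i+1) j))
  termination_by i j => (i, j)

-- The full table of pvEd values: the value both programs compute.
def pvEdTable (cs1 cs2 : List Char) (g : Int) : List (List Int) :=
  (List.range (cs1.length + 1)).map (fun i => (List.range (cs2.length + 1)).map (pvEd cs1 cs2 g i))

-- ---------- intermediate row-by-row form (bridge between A and pvEdTable) ----------
def pvStepRow (g : Int) (x : Char) (prev : List Int) : List Int → (Int × Char) → List Int :=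
  fun row jy =>
    let j := jy.1
    let y := jy.2
    row ++ [min (PySem.List.pyGetD prev (j-1) 0 + (if x = y then 0 else 1))
            (min (PySem.List.pyGetD prev j 0 + g)
                 (PySem.List.pyGetD row (j-1) 0 + g))]

def pvStepB (cs2 : List Char) (g : Int) : List (List Int) → (Int × Char) → List (List Int) :=
  fun table ix =>
    let i := ix.1
    let x := ix.2
    let prev := table.getLastD []
    let row0 : List Int := [i * g]
    let row := (PySem.List.enumerate cs2 1).foldl (pvStepRow g x prev) row0
    table ++ [row]

def pvStepA (cs1 cs2 : List Char) (g : Int) (i : Int) : List (List Int) → Int → List (List Int) :=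
  fun t j =>
    let x := PySem.List.pyGetD cs1 (i-1) ' '
    let y := PySem.List.pyGetD cs2 (j-1) ' '
    let diff_x_y : Int := if x ≠ y then 1 else 0
    PySem.List.pySetD t i (PySem.List.pySetD (PySem.List.pyGetD t i [])
      j (min (diff_x_y + PySem.List.pyGetD (PySem.List.pyGetD t (i-1) []) (j-1) 0)
         (min (g + PySem.List.pyGetD (PySem.List.pyGetD t (i-1) []) j 0)
              (g + PySem.List.pyGetD (PySem.List.pyGetD t i []) (j-1) 0))))

def pvOuterA (cs1 cs2 : List Char) (g : Int) : List (List Int) → Int → List (List Int) :=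
  fun t i => (PySem.List.pyRange 1 ((cs2.length:Int)+1) 1).foldl (pvStepA cs1 cs2 g i) t

-- Shorthand for the init rows of A's table and the finished row 0.
def pvInitRow (n : Nat) (g : Int) (a : Nat) : List Int := (a:Int) * g :: List.replicate n 0
def pvRow0 (n : Nat) (g : Int) : List Int := (List.range (n+1)).map (fun (j : Nat) => (j:Int) * g)
def pvRem (n : Nat) (g : Int) (i0 cnt : Nat) : List (List Int) :=
  (List.range cnt).map (fun k => pvInitRow n g (i0 + k))

theorem pv_a_def (s1 s2 : String) (g : Int) :
    get_similarity_table_py s1 s2 g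
      = (PySem.List.pyRange 1 ((s1.toList.length:Int)+1) 1).foldl (pvOuterA s1.toList s2.toList g)
          ((PySem.List.pyRange 0 ((s2.toList.length:Int)+1) 1).foldl
            (fun t i => PySem.List.pySetD t 0 (PySem.List.pySetD (PySem.List.pyGetD t 0 []) i (i * g)))
            ((PySem.List.pyRange 0 ((s1.toList.length:Int)+1) 1).foldl
              (fun t i => PySem.List.pySetD t i (PySem.List.pySetD (PySem.List.pyGetD t i []) 0 (i * g)))
              ((PySem.List.pyRange 0 ((s1.toList.length:Int)+1) 1).map
                (fun _ => List.replicate ((s2.toList.length:Int)+1).toNat (0:Int))))) := rfl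

-- getD at the last index is getLastD
theorem pv_getD_last (l : List (List Int)) (i0 : Nat) (h1 : 1 ≤ i0) (hl : l.length = i0) :
    l.getD (i0 - 1) [] = l.getLastD [] := by
  subst hl
  simp [List.getD, List.getLastD_eq_getLast?, List.getLast?_eq_getElem?]

theorem pv_getD_set_ne (l : List (List Int)) (n m : Nat) (v : List Int) (h : n ≠ m) :
    (l.set n v).getD m [] = l.getD m [] := by
  simp [List.getD, List.getElem?_set_ne h]

theorem pv_getD_set_self (l : List (List Int)) (n : Nat) (v : List Int) (h : n < l.length) :
    (l.set n v).getD n [] = v := by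
  simp [List.getD, h]

theorem pv_getD_append_left {α : Type} [Inhabited α] (l1 l2 : List α) (n : Nat) (d : α)
    (h : n < l1.length) : (l1 ++ l2).getD n d = l1.getD n d := by
  exact List.getD_append l1 l2 d n h

theorem pv_set_append_at {α : Type} (l1 l2 : List α) (n : Nat) (a : α) (h : n = l1.length) :
    (l1 ++ l2).set n a = l1 ++ l2.set 0 a := by
  subst h; simp

theorem pv_getD_append_at {α : Type} [Inhabited α] (l1 l2 : List α) (n : Nat) (d : α)
    (h : n = l1.length) : (l1 ++ l2).getD n d = l2.getD 0 d := by
  subst h; simp [List.getD, List.getElem?_append_right]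

-- the second init loop acts only on row 0
theorem pv_fold_row0 (g : Int) (js : List Int) (r : List Int) (tl : List (List Int)) :
    js.foldl (fun t i => PySem.List.pySetD t 0 (PySem.List.pySetD (PySem.List.pyGetD t 0 []) i (i * g))) (r :: tl)
      = (js.foldl (fun r i => PySem.List.pySetD r i (i * g)) r) :: tl := by
  induction js generalizing r with
  | nil => rfl
  | cons j js ih =>
      simp only [List.foldl_cons]
      rw [show PySem.List.pySetD (r :: tl) 0
            (PySem.List.pySetD (PySem.List.pyGetD (r :: tl) 0 []) j (j * g))
          = (PySem.List.pySetD r j (j * g)) :: tl by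
        simp [PySem.List.pySetD_of_nonneg, PySem.List.pyGetD_zero_cons]]
      exact ih _

-- filling positions 0..K-1 of a row with j*g
theorem pv_row_init (g : Int) : ∀ (K : Nat) (r : List Int), K ≤ r.length →
    (PySem.List.pyRange 0 (K:Int) 1).foldl (fun r i => PySem.List.pySetD r i (i * g)) r
      = (List.range K).map (fun (j : Nat) => (j:Int) * g) ++ r.drop K := by
  intro K
  induction K with
  | zero => intro r _; simp
  | succ K ih =>
      intro r hK
      have hKr : K < r.length := by omega
      rw [show ((K+1 : Nat) : Int) = (K:Int) + 1 from by push_cast; ring,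
          PySem.List.pyRange_one_succ_right (by positivity), List.foldl_append]
      rw [ih r (by omega)]
      simp only [List.foldl_cons, List.foldl_nil, PySem.List.pySetD_natCast]
      rw [pv_set_append_at _ _ K _ (by simp)]
      rw [List.drop_eq_getElem_cons hKr, List.set_cons_zero]
      rw [List.range_succ]
      simp

-- the first init loop sets the head of rows 0..K-1
theorem pv_tbl_init (g : Int) : ∀ (K : Nat) (t : List (List Int)), K ≤ t.length →
    (PySem.List.pyRange 0 (K:Int) 1).foldl
        (fun t i => PySem.List.pySetD t i (PySem.List.pySetD (PySem.List.pyGetD t i []) 0 (i * g))) t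
      = (List.range K).map (fun (i : Nat) => (t.getD i []).set 0 ((i:Int) * g)) ++ t.drop K := by
  intro K
  induction K with
  | zero => intro t _; simp
  | succ K ih =>
      intro t hK
      have hKt : K < t.length := by omega
      rw [show ((K+1 : Nat) : Int) = (K:Int) + 1 from by push_cast; ring,
          PySem.List.pyRange_one_succ_right (by positivity), List.foldl_append]
      rw [ih t (by omega)]
      simp only [List.foldl_cons, List.foldl_nil, PySem.List.pySetD_natCast,
        PySem.List.pyGetD_natCast]
      rw [pv_getD_append_at _ _ K _ (by simp)]
      rw [pv_set_append_at _ _ K _ (by simp)]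
      rw [List.drop_eq_getElem_cons hKt, List.getD_cons_zero, List.set_cons_zero]
      rw [List.range_succ]
      simp [List.getD, hKt, PySem.List.pySetD_of_nonneg]

-- pvRem peels its first row
theorem pv_rem_cons (n : Nat) (g : Int) (i0 L : Nat) :
    pvRem n g i0 (L+1) = pvInitRow n g i0 :: pvRem n g (i0+1) L := by
  unfold pvRem
  rw [List.range_succ_eq_map]
  simp only [List.map_cons, List.map_map, Nat.add_zero, Function.comp_def]
  congr 1
  apply List.map_congr_left
  intro k _
  congr 1
  omega

-- ONE inner (row) loop of A equals the row fold, written into place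
theorem pv_inner (cs1 cs2 : List Char) (g : Int) (prev : List Int) (x : Char) (i : Nat)
    (hi : 1 ≤ i) (hx : x = cs1.getD (i-1) ' ') :
    ∀ (suf : List Char) (j0 : Nat) (row : List Int) (t : List (List Int)),
      1 ≤ j0 → cs2.drop (j0 - 1) = suf → j0 + suf.length = cs2.length + 1 →
      i < t.length →
      t.getD (i-1) [] = prev →
      t.getD i [] = row ++ List.replicate suf.length 0 →
      row.length = j0 →
      (PySem.List.pyRange (j0:Int) ((cs2.length:Int)+1) 1).foldl (pvStepA cs1 cs2 g (i:Int)) t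
        = t.set i ((PySem.List.enumerate suf (j0:Int)).foldl (pvStepRow g x prev) row) := by
  intro suf
  induction suf with
  | nil =>
      intro j0 row t hj0 hsuf hlen hit hprev hcur hrow
      simp only [List.length_nil] at hlen
      rw [PySem.List.pyRange_one_eq_nil (by omega)]
      simp only [PySem.List.enumerate_nil, List.foldl_nil]
      have hget : t[i] = row := by
        have h := hcur
        simp only [List.length_nil, List.replicate_zero, List.append_nil, List.getD,
          List.getElem?_eq_getElem hit, Option.getD_some] at h
        exact h
      rw [← hget]
      exact (List.set_getElem_self hit).symm
  | cons y rest ih =>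
      intro j0 row t hj0 hsuf hlen hit hprev hcur hrow
      simp only [List.length_cons] at hlen
      have hlt : (j0:Int) < (cs2.length:Int) + 1 := by omega
      rw [PySem.List.pyRange_one_cons hlt, List.foldl_cons]
      have hci : ((i:Int)) - 1 = ((i-1 : Nat) : Int) := by omega
      have hcj : ((j0:Int)) - 1 = ((j0-1 : Nat) : Int) := by omega
      have hy : cs2.getD (j0-1) ' ' = y := by
        have h0 : (cs2.drop (j0-1))[0]? = some y := by rw [hsuf]; rfl
        rw [List.getElem?_drop] at h0
        simp only [Nat.add_zero] at h0
        simp [List.getD, h0]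
      have hp3 : (row ++ List.replicate (y :: rest).length 0).getD (j0-1) 0 = row.getD (j0-1) 0 :=
        pv_getD_append_left _ _ _ _ (by omega)
      have hval : ∀ p1 p2 p3 : Int,
          min ((if ¬ x = y then (1:Int) else 0) + p1) (min (g + p2) (g + p3))
            = min (p1 + (if x = y then (0:Int) else 1)) (min (p2 + g) (p3 + g)) := by
        intro p1 p2 p3
        rcases eq_or_ne x y with h | h <;> simp [h] <;> ring_nf
      -- B-form value at this step
      set v : Int := min (prev.getD (j0-1) 0 + (if x = y then (0:Int) else 1))
        (min (prev.getD j0 0 + g) (row.getD (j0-1) 0 + g)) with hv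
      have hstepB : pvStepRow g x prev row ((j0:Int), y) = row ++ [v] := by
        simp only [pvStepRow, hcj]
        simp only [PySem.List.pyGetD_natCast, hv]
      have hstepA : pvStepA cs1 cs2 g (i:Int) t (j0:Int)
          = t.set i ((row ++ [v]) ++ List.replicate rest.length 0) := by
        simp only [pvStepA, hci, hcj]
        simp only [PySem.List.pyGetD_natCast, PySem.List.pySetD_natCast]
        rw [← hx, hprev, hcur, hy, hp3, hval]
        rw [pv_set_append_at _ _ j0 _ hrow.symm]
        simp [List.replicate_succ, hv]
      rw [hstepA]
      have hdrop : cs2.drop j0 = rest := by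
        have h := congrArg (List.drop 1) hsuf
        rw [List.drop_drop] at h
        rw [show j0 = j0 - 1 + 1 from by omega]
        simpa using h
      have hlen' : i < (t.set i ((row ++ [v]) ++ List.replicate rest.length 0)).length := by
        simpa using hit
      have hrec := ih (j0+1) (row ++ [v]) (t.set i ((row ++ [v]) ++ List.replicate rest.length 0))
        (by omega) (by simpa using hdrop) (by omega) hlen'
        (by rw [pv_getD_set_ne _ _ _ _ (by omega)]; exact hprev)
        (by rw [pv_getD_set_self _ _ _ hit])
        (by simp [hrow])
      rw [show ((j0:Int)) + 1 = ((j0+1 : Nat) : Int) from by push_cast; ring, hrec, List.set_set]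
      rw [PySem.List.enumerate_cons, List.foldl_cons, hstepB,
        show ((j0:Int)) + 1 = ((j0+1 : Nat) : Int) from by push_cast; ring]

-- the outer loop of A equals the table fold
theorem pv_outer (cs1 cs2 : List Char) (g : Int) :
    ∀ (suf : List Char) (i0 : Nat) (tb : List (List Int)),
      1 ≤ i0 → cs1.drop (i0 - 1) = suf → i0 + suf.length = cs1.length + 1 →
      tb.length = i0 →
      (PySem.List.pyRange (i0:Int) ((cs1.length:Int)+1) 1).foldl (pvOuterA cs1 cs2 g)
          (tb ++ pvRem cs2.length g i0 suf.length)
        = (PySem.List.enumerate suf (i0:Int)).foldl (pvStepB cs2 g) tb := by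
  intro suf
  induction suf with
  | nil =>
      intro i0 tb hi0 hsuf hlen htb
      simp only [List.length_nil] at hlen
      rw [PySem.List.pyRange_one_eq_nil (by omega)]
      simp [pvRem, PySem.List.enumerate_nil]
  | cons x rest ih =>
      intro i0 tb hi0 hsuf hlen htb
      simp only [List.length_cons] at hlen
      rw [PySem.List.pyRange_one_cons (by omega), List.foldl_cons]
      simp only [List.length_cons]
      rw [pv_rem_cons]
      have hx : x = cs1.getD (i0-1) ' ' := by
        have h0 : (cs1.drop (i0-1))[0]? = some x := by rw [hsuf]; rfl
        rw [List.getElem?_drop] at h0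
        simp only [Nat.add_zero] at h0
        simp [List.getD, h0]
      have hit : i0 < (tb ++ pvInitRow cs2.length g i0 :: pvRem cs2.length g (i0+1) rest.length).length := by
        simp [htb]
      have hprev : (tb ++ pvInitRow cs2.length g i0 :: pvRem cs2.length g (i0+1) rest.length).getD (i0-1) []
          = tb.getLastD [] := by
        rw [pv_getD_append_left _ _ _ _ (by omega), pv_getD_last tb i0 hi0 htb]
      have hcur : (tb ++ pvInitRow cs2.length g i0 :: pvRem cs2.length g (i0+1) rest.length).getD i0 []
          = [(i0:Int) * g] ++ List.replicate cs2.length 0 := by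
        rw [pv_getD_append_at _ _ i0 _ htb.symm]
        simp [pvInitRow]
      have hstep : pvOuterA cs1 cs2 g (tb ++ pvInitRow cs2.length g i0 :: pvRem cs2.length g (i0+1) rest.length) (i0:Int)
          = (tb ++ [(PySem.List.enumerate cs2 1).foldl (pvStepRow g x (tb.getLastD [])) [(i0:Int) * g]])
              ++ pvRem cs2.length g (i0+1) rest.length := by
        show (PySem.List.pyRange (((1:Nat)):Int) ((cs2.length:Int)+1) 1).foldl (pvStepA cs1 cs2 g (i0:Int)) _ = _
        rw [pv_inner cs1 cs2 g (tb.getLastD []) x i0 hi0 hx cs2 1 [(i0:Int) * g] _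
          (le_refl 1) (by simp) (by omega) hit hprev (by simpa using hcur) rfl]
        rw [pv_set_append_at _ _ i0 _ htb.symm]
        simp
      rw [hstep]
      have hdrop : cs1.drop i0 = rest := by
        have h := congrArg (List.drop 1) hsuf
        rw [List.drop_drop] at h
        rw [show i0 = i0 - 1 + 1 from by omega]
        simpa using h
      have hrec := ih (i0+1) (tb ++ [(PySem.List.enumerate cs2 1).foldl (pvStepRow g x (tb.getLastD [])) [(i0:Int) * g]])
        (by omega) (by simpa using hdrop) (by omega) (by simp [htb])
      rw [show ((i0:Int)) + 1 = ((i0+1 : Nat) : Int) from by push_cast; ring, hrec]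
      rw [PySem.List.enumerate_cons, List.foldl_cons]
      rw [show pvStepB cs2 g tb ((i0:Int), x) = tb ++ [(PySem.List.enumerate cs2 1).foldl (pvStepRow g x (tb.getLastD [])) [(i0:Int) * g]] from rfl]
      rw [show ((i0:Int)) + 1 = ((i0+1 : Nat) : Int) from by push_cast; ring]

-- A equals the row-by-row fold
theorem pv_a_rowfold (s1 s2 : String) (g : Int) :
    get_similarity_table_py s1 s2 g
      = (PySem.List.enumerate s1.toList 1).foldl (pvStepB s2.toList g)
          [pvRow0 s2.toList.length g] := by
  rw [pv_a_def]
  set cs1 := s1.toList with hcs1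
  set cs2 := s2.toList with hcs2
  set m := cs1.length with hm
  set n := cs2.length with hn
  have ht0 : (PySem.List.pyRange 0 ((m:Int)+1) 1).map (fun _ => List.replicate ((n:Int)+1).toNat (0:Int))
      = List.replicate (m+1) (List.replicate (n+1) 0) := by
    rw [List.map_const']
    have h1 : (PySem.List.pyRange 0 ((m:Int)+1) 1).length = m+1 := by
      rw [PySem.List.length_pyRange_one]
      omega
    have h3 : ((n:Int)+1).toNat = n+1 := by omega
    rw [h1, h3]
  have ht1 : (PySem.List.pyRange 0 ((m:Int)+1) 1).foldl
      (fun t i => PySem.List.pySetD t i (PySem.List.pySetD (PySem.List.pyGetD t i []) 0 (i * g)))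
      (List.replicate (m+1) (List.replicate (n+1) 0))
      = pvInitRow n g 0 :: pvRem n g 1 m := by
    rw [show ((m:Int)+1) = ((m+1 : Nat) : Int) from by push_cast; ring]
    rw [pv_tbl_init g (m+1) _ (by simp)]
    rw [List.drop_of_length_le (by simp), List.append_nil]
    have hrowi : ∀ i ∈ List.range (m+1),
        ((List.replicate (m+1) (List.replicate (n+1) (0:Int))).getD i []).set 0 ((i:Int) * g)
          = pvInitRow n g i := by
      intro i hi
      rw [List.getD_replicate _ (List.mem_range.mp hi)]
      simp [pvInitRow, List.replicate_succ]
    rw [List.map_congr_left hrowi]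
    rw [List.range_succ_eq_map]
    simp only [List.map_cons, List.map_map, Function.comp_def]
    congr 1
    unfold pvRem
    apply List.map_congr_left
    intro k _
    congr 1
    omega
  rw [ht0, ht1]
  have ht2 : (PySem.List.pyRange 0 ((n:Int)+1) 1).foldl
      (fun t i => PySem.List.pySetD t 0 (PySem.List.pySetD (PySem.List.pyGetD t 0 []) i (i * g)))
      (pvInitRow n g 0 :: pvRem n g 1 m)
      = [pvRow0 n g] ++ pvRem n g 1 m := by
    rw [pv_fold_row0]
    rw [show ((n:Int)+1) = ((n+1 : Nat) : Int) from by push_cast; ring]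
    rw [pv_row_init g (n+1) _ (by simp [pvInitRow])]
    rw [List.drop_of_length_le (by simp [pvInitRow])]
    simp [pvRow0]
  rw [ht2]
  have hout := pv_outer cs1 cs2 g cs1 1 [pvRow0 n g] (le_refl 1) (by simp) (by omega) rfl
  push_cast at hout ⊢
  exact hout

-- ---------- the row-by-row fold equals the pvEd table ----------
theorem pv_row_ed (cs1 cs2 : List Char) (g : Int) (i : Nat) (x : Char)
    (hx : x = cs1.getD i ' ') :
    ∀ (suf : List Char) (j0 : Nat), 1 ≤ j0 → cs2.drop (j0 - 1) = suf →
      j0 + suf.length = cs2.length + 1 →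
      (PySem.List.enumerate suf (j0:Int)).foldl
          (pvStepRow g x ((List.range (cs2.length + 1)).map (pvEd cs1 cs2 g i)))
          ((List.range j0).map (pvEd cs1 cs2 g (i+1)))
        = (List.range (cs2.length + 1)).map (pvEd cs1 cs2 g (i+1)) := by
  intro suf
  induction suf with
  | nil =>
      intro j0 hj0 hsuf hlen
      simp only [List.length_nil] at hlen
      rw [PySem.List.enumerate_nil, List.foldl_nil,
        show j0 = cs2.length + 1 from by omega]
  | cons y rest ih =>
      intro j0 hj0 hsuf hlen
      simp only [List.length_cons] at hlen
      rw [PySem.List.enumerate_cons, List.foldl_cons]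
      have hy : cs2.getD (j0-1) ' ' = y := by
        have h0 : (cs2.drop (j0-1))[0]? = some y := by rw [hsuf]; rfl
        rw [List.getElem?_drop] at h0
        simp only [Nat.add_zero] at h0
        simp [List.getD, h0]
      have hcj : ((j0:Int)) - 1 = ((j0-1 : Nat) : Int) := by omega
      have hstep : pvStepRow g x ((List.range (cs2.length + 1)).map (pvEd cs1 cs2 g i))
            ((List.range j0).map (pvEd cs1 cs2 g (i+1))) ((j0:Int), y)
          = (List.range (j0+1)).map (pvEd cs1 cs2 g (i+1)) := by
        simp only [pvStepRow, hcj]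
        simp only [PySem.List.pyGetD_natCast]
        rw [PySem.List.getD_map_range _ _ _ _ (by omega),
            PySem.List.getD_map_range _ _ _ _ (by omega),
            PySem.List.getD_map_range _ _ _ _ (by omega)]
        rw [List.range_succ, List.map_append]
        congr 1
        simp only [List.map_cons, List.map_nil]
        congr 1
        rw [show j0 = (j0-1)+1 from by omega]
        show _ = pvEd cs1 cs2 g (i+1) ((j0-1)+1)
        rw [pvEd]
        rw [← hx, hy]
        rcases eq_or_ne x y with h | h <;> simp [h] <;> ring_nf
      rw [hstep]
      have hdrop : cs2.drop j0 = rest := by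
        have h := congrArg (List.drop 1) hsuf
        rw [List.drop_drop] at h
        rw [show j0 = j0 - 1 + 1 from by omega]
        simpa using h
      have hrec := ih (j0+1) (by omega) (by simpa using hdrop) (by omega)
      rw [show ((j0:Int)) + 1 = ((j0+1 : Nat) : Int) from by push_cast; ring]
      exact hrec

theorem pv_tab_ed (cs1 cs2 : List Char) (g : Int) :
    ∀ (suf : List Char) (i0 : Nat), 1 ≤ i0 → cs1.drop (i0 - 1) = suf →
      i0 + suf.length = cs1.length + 1 →
      (PySem.List.enumerate suf (i0:Int)).foldl (pvStepB cs2 g)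
          ((List.range i0).map (fun i => (List.range (cs2.length + 1)).map (pvEd cs1 cs2 g i)))
        = pvEdTable cs1 cs2 g := by
  intro suf
  induction suf with
  | nil =>
      intro i0 hi0 hsuf hlen
      simp only [List.length_nil] at hlen
      rw [PySem.List.enumerate_nil, List.foldl_nil]
      unfold pvEdTable
      rw [show i0 = cs1.length + 1 from by omega]
  | cons x rest ih =>
      intro i0 hi0 hsuf hlen
      obtain ⟨k, rfl⟩ : ∃ k, i0 = k + 1 := ⟨i0 - 1, by omega⟩
      simp only [List.length_cons] at hlen
      simp only [Nat.add_sub_cancel] at hsuf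
      rw [PySem.List.enumerate_cons, List.foldl_cons]
      have hx : x = cs1.getD k ' ' := by
        have h0 : (cs1.drop k)[0]? = some x := by rw [hsuf]; rfl
        rw [List.getElem?_drop] at h0
        simp only [Nat.add_zero] at h0
        simp [List.getD, h0]
      have hlast : ((List.range (k+1)).map (fun i => (List.range (cs2.length + 1)).map (pvEd cs1 cs2 g i))).getLastD []
          = (List.range (cs2.length + 1)).map (pvEd cs1 cs2 g k) := by
        rw [List.range_succ (n := k), List.map_append]
        simp only [List.map_cons, List.map_nil]
        rw [List.getLastD_concat]
      have hstep : pvStepB cs2 g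
            ((List.range (k+1)).map (fun i => (List.range (cs2.length + 1)).map (pvEd cs1 cs2 g i))) (((k+1:Nat):Int), x)
          = (List.range (k+2)).map (fun i => (List.range (cs2.length + 1)).map (pvEd cs1 cs2 g i)) := by
        simp only [pvStepB]
        rw [hlast]
        have hrow0 : [((k+1:Nat):Int) * g] = (List.range 1).map (pvEd cs1 cs2 g (k+1)) := by
          simp only [List.range_one, List.map_cons, List.map_nil]
          rw [pvEd]
          push_cast
          ring_nf
        rw [hrow0]
        have h := pv_row_ed cs1 cs2 g k x hx cs2 1 (le_refl 1) (by simp) (by omega)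
        rw [Nat.cast_one] at h
        rw [h]
        conv_rhs => rw [List.range_succ (n := k+1), List.map_append]
        simp
      rw [hstep]
      have hdrop : cs1.drop (k+1) = rest := by
        have h := congrArg (List.drop 1) hsuf
        rw [List.drop_drop] at h
        simpa using h
      have hrec := ih (k+2) (by omega) hdrop (by omega)
      rw [show ((k+1:Nat):Int) + 1 = ((k+2:Nat):Int) from by push_cast; ring]
      exact hrec

theorem pv_a_ed (s1 s2 : String) (g : Int) :
    get_similarity_table_py s1 s2 g = pvEdTable s1.toList s2.toList g := by
  rw [pv_a_rowfold]
  have hrow0 : [pvRow0 s2.toList.length g]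
      = (List.range 1).map (fun i => (List.range (s2.toList.length + 1)).map (pvEd s1.toList s2.toList g i)) := by
    simp only [List.range_one, List.map_cons, List.map_nil]
    unfold pvRow0
    congr 1
    apply List.map_congr_left
    intro j _
    rw [pvEd]
  rw [hrow0]
  have h := pv_tab_ed s1.toList s2.toList g s1.toList 1 (le_refl 1) (by simp) (by omega)
  rw [Nat.cast_one] at h
  exact h

-- ---------- B (memoized recursion) equals the pvEd table ----------
-- the memo invariant: every stored value is the pvEd value of its key
def pvInv (cs1 cs2 : List Char) (g : Int) (memo : PySem.Dict (Nat × Nat) Int) : Prop :=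
  ∀ i j v, memo.get? (i, j) = some v → v = pvEd cs1 cs2 g i j

theorem pvInv_empty (cs1 cs2 : List Char) (g : Int) :
    pvInv cs1 cs2 g PySem.Dict.empty := by
  intro i j v h
  simp [PySem.Dict.get?_empty] at h

theorem pvInv_insert (cs1 cs2 : List Char) (g : Int) (memo : PySem.Dict (Nat × Nat) Int)
    (i j : Nat) (v : Int) (hm : pvInv cs1 cs2 g memo) (hv : v = pvEd cs1 cs2 g i j) :
    pvInv cs1 cs2 g (memo.insert (i, j) v) := by
  intro i' j' w h
  rw [PySem.Dict.get?_insert] at h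
  split at h
  · rename_i heq
    cases heq
    cases h
    exact hv
  · exact hm i' j' w h

theorem pvMemoD_correct (cs1 cs2 : List Char) (g : Int) :
    ∀ (i j : Nat) (memo : PySem.Dict (Nat × Nat) Int), pvInv cs1 cs2 g memo →
      (pvMemoD cs1 cs2 g i j memo).1 = pvEd cs1 cs2 g i j ∧
      pvInv cs1 cs2 g (pvMemoD cs1 cs2 g i j memo).2 := by
  intro i j memo
  induction i, j, memo using pvMemoD.induct cs1 cs2 g with
  | case1 i j memo v hget =>
      intro hm
      rw [pvMemoD.eq_def]
      simp only [hget]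
      exact ⟨hm i j v hget, hm⟩
  | case2 memo j hget =>
      intro hm
      rw [pvMemoD.eq_def]
      simp only [hget]
      exact ⟨by rw [pvEd], pvInv_insert _ _ _ _ _ _ _ hm (by rw [pvEd])⟩
  | case3 memo i hget =>
      intro hm
      rw [pvMemoD.eq_def]
      simp only [hget]
      exact ⟨by rw [pvEd], pvInv_insert _ _ _ _ _ _ _ hm (by rw [pvEd])⟩
  | case4 memo i j r1 r2 hget ih1 ih2 ih3 ih4 =>
      intro hm
      rw [pvMemoD.eq_def]
      simp only [hget]
      obtain ⟨e1, I1⟩ := ih1 hm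
      obtain ⟨e2, I2⟩ := ih3 I1
      obtain ⟨e3, I3⟩ := ih4 I2
      refine ⟨?_, ?_⟩
      · rw [e1, e2, e3, pvEd]
      · exact pvInv_insert _ _ _ _ _ _ _ I3 (by rw [e1, e2, e3, pvEd])

theorem pv_b_rowfold (cs1 cs2 : List Char) (g : Int) (i : Nat) :
    ∀ (js : List Nat) (acc : List Int) (memo : PySem.Dict (Nat × Nat) Int),
      pvInv cs1 cs2 g memo →
      (js.foldl (fun acc2 j =>
          let p := pvMemoD cs1 cs2 g i j acc2.2
          (acc2.1 ++ [p.1], p.2)) (acc, memo)).1 = acc ++ js.map (pvEd cs1 cs2 g i) ∧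
      pvInv cs1 cs2 g (js.foldl (fun acc2 j =>
          let p := pvMemoD cs1 cs2 g i j acc2.2
          (acc2.1 ++ [p.1], p.2)) (acc, memo)).2 := by
  intro js
  induction js with
  | nil => intro acc memo hm; exact ⟨by simp, hm⟩
  | cons j js ih =>
      intro acc memo hm
      simp only [List.foldl_cons, List.map_cons]
      obtain ⟨h1, h2⟩ := pvMemoD_correct cs1 cs2 g i j memo hm
      have hrec := ih (acc ++ [(pvMemoD cs1 cs2 g i j memo).1]) (pvMemoD cs1 cs2 g i j memo).2 h2
      rw [h1] at hrec ⊢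
      simpa using hrec

theorem pv_b_ed (s1 s2 : String) (g : Int) :
    get_similarity_table_py_alt s1 s2 g = pvEdTable s1.toList s2.toList g := by
  unfold get_similarity_table_py_alt pvEdTable
  set cs1 := s1.toList
  set cs2 := s2.toList
  suffices h : ∀ (is : List Nat) (acc : List (List Int)) (memo : PySem.Dict (Nat × Nat) Int),
      pvInv cs1 cs2 g memo →
      (is.foldl (fun acc i =>
        let r := (List.range (cs2.length + 1)).foldl (fun acc2 j =>
            let p := pvMemoD cs1 cs2 g i j acc2.2
            (acc2.1 ++ [p.1], p.2)) (([] : List Int), acc.2)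
        (acc.1 ++ [r.1], r.2)) (acc, memo)).1
        = acc ++ is.map (fun i => (List.range (cs2.length + 1)).map (pvEd cs1 cs2 g i)) ∧
      pvInv cs1 cs2 g (is.foldl (fun acc i =>
        let r := (List.range (cs2.length + 1)).foldl (fun acc2 j =>
            let p := pvMemoD cs1 cs2 g i j acc2.2
            (acc2.1 ++ [p.1], p.2)) (([] : List Int), acc.2)
        (acc.1 ++ [r.1], r.2)) (acc, memo)).2 by
    have := (h (List.range (cs1.length + 1)) [] PySem.Dict.empty (pvInv_empty cs1 cs2 g)).1
    simpa using this
  intro is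
  induction is with
  | nil => intro acc memo hm; exact ⟨by simp, hm⟩
  | cons i is ih =>
      intro acc memo hm
      simp only [List.foldl_cons, List.map_cons]
      obtain ⟨h1, h2⟩ := pv_b_rowfold cs1 cs2 g i (List.range (cs2.length + 1)) [] memo hm
      have := ih (acc ++ [((List.range (cs2.length + 1)).foldl (fun acc2 j =>
            let p := pvMemoD cs1 cs2 g i j acc2.2
            (acc2.1 ++ [p.1], p.2)) ([], memo)).1])
        ((List.range (cs2.length + 1)).foldl (fun acc2 j =>
            let p := pvMemoD cs1 cs2 g i j acc2.2
            (acc2.1 ++ [p.1], p.2)) ([], memo)).2 h2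
      rw [h1] at this ⊢
      simpa using this

theorem pv_main (s1 s2 : String) (g : Int) :
    get_similarity_table_py s1 s2 g = get_similarity_table_py_alt s1 s2 g := by
  rw [pv_a_ed, pv_b_ed]

-- ===== VERDICT (by name: the statement is the Claim_ definition above) =====
theorem get_similarity_table_py_spec : Claim_equal_get_similarity_table_py := by
  intro s1 s2 g _
  unfold Spec_get_similarity_table_py
  exact pv_main s1 s2 g
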